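-- pv_equiv track=rewrite | github.com/ngominhhoang/AOA_Assignment2 | task8.py | dp
-- ===== SOURCE A (Python) =====
-- from dataclasses import dataclass, field
-- import collections
--
-- INFINITY = int(1e15)
--
-- def dp(n, k, m, c, f):
--     # returns: cost to get to platform n with exactly m jumps
--
--     # base case: we start from (0, 0)
--     f[0][0] = 0
--
--     @dataclass(order=True)
--     class PrioritizedItem:
--         value: int
--         index: int=field(compare=False)
--
--     # iterate through all subproblems
--     # exact number of jumps (has to be positive)
--     for jumps in range(1, m + 1):
--         # initialize a min heap
--         q = collections.deque()
--
--         for i in range(0, n + 1):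
--             while q and q[0].index < max(0, i - k):
--                 q.popleft()
--
--             f[i][jumps] = q[0].value if q else INFINITY
--
--             if i < n:
--                 while q and q[-1].value > f[i][jumps - 1] + c[i]:
--                     q.pop()
--
--                 q.append(PrioritizedItem(
--                     value=min(f[i][jumps - 1] + c[i], INFINITY),
--                     index=i
--                 ))
--
--     return f[n][m]
-- ===== SOURCE B (Python) =====
-- INFINITY = int(1e15)
--
-- def dp(n, k, m, c, f):
--     # same in-place mutation of f as the original
--     f[0][0] = 0
--     for jumps in range(1, m + 1):
--         for i in range(0, n + 1):
--             best = INFINITY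
--             for j in range(max(0, i - k), i):
--                 cand = min(f[j][jumps - 1] + c[j], INFINITY)
--                 if cand < best:
--                     best = cand
--             f[i][jumps] = best
--     return f[n][m]
-- ===== Notes on version B (the rewrite author's own statement) =====
-- stated objective: simpler
-- what changed: Replaces the monotone-deque sliding-window minimum (with its PrioritizedItem dataclass) by a direct rescan of the at-most-k-wide window for each platform inside the same two outer DP loops.
import Mathlib
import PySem

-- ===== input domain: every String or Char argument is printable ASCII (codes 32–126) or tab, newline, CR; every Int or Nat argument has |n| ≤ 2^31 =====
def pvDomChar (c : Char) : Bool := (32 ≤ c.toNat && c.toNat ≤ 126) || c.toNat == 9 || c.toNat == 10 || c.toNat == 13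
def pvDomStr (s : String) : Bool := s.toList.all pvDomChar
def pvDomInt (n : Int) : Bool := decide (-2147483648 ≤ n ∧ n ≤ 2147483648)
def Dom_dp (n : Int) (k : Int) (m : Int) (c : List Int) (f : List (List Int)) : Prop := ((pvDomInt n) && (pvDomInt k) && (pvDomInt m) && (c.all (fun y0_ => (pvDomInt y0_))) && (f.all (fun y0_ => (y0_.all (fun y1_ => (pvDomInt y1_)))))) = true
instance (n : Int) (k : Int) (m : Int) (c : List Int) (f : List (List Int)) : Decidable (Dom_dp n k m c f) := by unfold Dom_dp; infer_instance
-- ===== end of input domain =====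

-- B replaces A's monotone-deque sliding-window minimum by a direct rescan of the window
-- (simpler, no deque/dataclass); both Pythons mutate f in place identically, the theorems
-- here are about the return value.

-- INFINITY = int(1e15)
def pvINF : Int := 1000000000000000

-- f[i][j] read (indices are nonnegative and in range on every admitted input)
def pvGetF (f : List (List Int)) (i j : Int) : Int := (f.getD i.toNat []).getD j.toNat 0

-- f[i][j] = x  (in-place update of the matrix)
def pvSetF (f : List (List Int)) (i j : Int) (x : Int) : List (List Int) :=
  f.set i.toNat ((f.getD i.toNat []).set j.toNat x)

-- f[n][m] final read, with Python's negative-index rule (none = IndexError, excluded by Pre_)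
def pvReadNM (f : List (List Int)) (n m : Int) : Int :=
  match PySem.List.pyGet? f n with
  | some row => match PySem.List.pyGet? row m with | some x => x | none => 0
  | none => 0

-- ===== PORT A =====
-- while q and q[-1].value > val: q.pop()   (drop from the back while the value is larger)
def pvPopBack (q : List (Int × Int)) (val : Int) : List (Int × Int) :=
  (q.reverse.dropWhile (fun e => decide (val < e.1))).reverse

-- body of A's inner loop over i; state = (f, q); q holds (value, index) pairs, front first
def pvStepA (n : Int) (k : Int) (jumps : Int) (c : List Int)
    (st : List (List Int) × List (Int × Int)) (i : Int) :
    List (List Int) × List (Int × Int) :=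
  let q1 := st.2.dropWhile (fun e => decide (e.2 < max 0 (i - k)))
  let fv := match q1 with | [] => pvINF | e :: _ => e.1
  let f1 := pvSetF st.1 i jumps fv
  if i < n then
    let val := pvGetF f1 i (jumps - 1) + c.getD i.toNat 0
    (f1, pvPopBack q1 val ++ [(min val pvINF, i)])
  else (f1, q1)

-- one pass of A's outer loop (one value of jumps; q starts empty)
def pvPassA (n : Int) (k : Int) (c : List Int) (f : List (List Int)) (jumps : Int) :
    List (List Int) :=
  ((PySem.List.pyRange 0 (n + 1)).foldl (pvStepA n k jumps c) (f, [])).1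

def dp (n : Int) (k : Int) (m : Int) (c : List Int) (f : List (List Int)) : Int :=
  pvReadNM ((PySem.List.pyRange 1 (m + 1)).foldl (pvPassA n k c) (pvSetF f 0 0 0)) n m

-- ===== PORT B =====
-- best = min over j in range(max(0, i-k), i) of min(f[j][jumps-1] + c[j], INFINITY)
def pvBest (k : Int) (jumps : Int) (c : List Int) (f : List (List Int)) (i : Int) : Int :=
  (PySem.List.pyRange (max 0 (i - k)) i).foldl
    (fun best j =>
      let cand := min (pvGetF f j (jumps - 1) + c.getD j.toNat 0) pvINF
      if cand < best then cand else best) pvINF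

def pvStepB (k : Int) (jumps : Int) (c : List Int) (f : List (List Int)) (i : Int) :
    List (List Int) :=
  pvSetF f i jumps (pvBest k jumps c f i)

def pvPassB (n : Int) (k : Int) (c : List Int) (f : List (List Int)) (jumps : Int) :
    List (List Int) :=
  (PySem.List.pyRange 0 (n + 1)).foldl (pvStepB k jumps c) f

def dp_alt (n : Int) (k : Int) (m : Int) (c : List Int) (f : List (List Int)) : Int :=
  pvReadNM ((PySem.List.pyRange 1 (m + 1)).foldl (pvPassB n k c) (pvSetF f 0 0 0)) n m

-- ===== PRECONDITION & SPEC =====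
-- Pre_dp is exactly where Python A returns normally: f[0][0] assignable, every loop access
-- in range when the loops run (0 ≤ n and 1 ≤ m), and the final f[n][m] read (with Python's
-- negative-index rule) in range; outside it A raises IndexError.
def Pre_dp (n : Int) (k : Int) (m : Int) (c : List Int) (f : List (List Int)) : Prop :=
  1 ≤ f.length ∧ 1 ≤ (f.getD 0 []).length ∧
  (0 ≤ n → 1 ≤ m →
    n + 1 ≤ (f.length : Int) ∧ n ≤ (c.length : Int) ∧
      ∀ row ∈ f.take (n + 1).toNat, m + 1 ≤ (row.length : Int)) ∧
  (-(f.length : Int) ≤ n ∧ n < (f.length : Int)) ∧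
  (-(((f.getD (if n < 0 then n + f.length else n).toNat []).length : Int)) ≤ m ∧
    m < ((f.getD (if n < 0 then n + f.length else n).toNat []).length : Int))
instance (n : Int) (k : Int) (m : Int) (c : List Int) (f : List (List Int)) : Decidable (Pre_dp n k m c f) := by unfold Pre_dp; infer_instance

def pvWitness_dp : Int × Int × Int × List Int × List (List Int) := (1, 1, 1, [3], [[9, 9], [9, 9]])

def Spec_dp (n : Int) (k : Int) (m : Int) (c : List Int) (f : List (List Int)) (out : Int) : Prop := out = dp_alt n k m c f
instance (n : Int) (k : Int) (m : Int) (c : List Int) (f : List (List Int)) (out : Int) : Decidable (Spec_dp n k m c f out) := by unfold Spec_dp; infer_instance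

-- ===== CLAIM (what is proved, stated in full; the proofs are below) =====
def Claim_equal_dp : Prop := ∀ (n : Int) (k : Int) (m : Int) (c : List Int) (f : List (List Int)), Dom_dp n k m c f → Pre_dp n k m c f → Spec_dp n k m c f (dp n k m c f)

-- ===== LEMMAS AND PROOFS =====

-- proof-side vocabulary: all reads of column jumps-1 during a pass see the pass-start matrix F
def pvU (c : List Int) (jumps : Int) (F : List (List Int)) (j : Int) : Int :=
  pvGetF F j (jumps - 1) + c.getD j.toNat 0

def pvV (c : List Int) (jumps : Int) (F : List (List Int)) (j : Int) : Int :=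
  min (pvU c jumps F j) pvINF

def pvAllLe (c : List Int) (jumps : Int) (F : List (List Int)) (a t j : Int) : Bool :=
  (PySem.List.pyRange a t).all (fun j' => decide (pvV c jumps F j ≤ pvU c jumps F j'))

-- closed form of A's deque before step t of a pass
def pvCond (k : Int) (c : List Int) (jumps : Int) (F : List (List Int)) (t j : Int) : Bool :=
  (decide (t ≤ j + 1) || decide (max 0 (t - 1 - k) ≤ j)) && pvAllLe c jumps F (j + 1) t j

def pvCanon (k : Int) (c : List Int) (jumps : Int) (F : List (List Int)) (t : Int) :
    List (Int × Int) :=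
  (PySem.List.pyRange 0 t).filterMap
    (fun j => if pvCond k c jumps F t j then some (pvV c jumps F j, j) else none)

-- closed form of A's deque after the popleft at step t (window lower bound L)
def pvCondA (L : Int) (c : List Int) (jumps : Int) (F : List (List Int)) (t j : Int) : Bool :=
  decide (L ≤ j) && pvAllLe c jumps F (j + 1) t j

def pvQ1 (L : Int) (c : List Int) (jumps : Int) (F : List (List Int)) (t : Int) :
    List (Int × Int) :=
  (PySem.List.pyRange 0 t).filterMap
    (fun j => if pvCondA L c jumps F t j then some (pvV c jumps F j, j) else none)

lemma pv_dropWhile_eq_filter_not {α : Type} (p : α → Bool) (l : List α)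
    (h : l.Pairwise (fun a b => p b = true → p a = true)) :
    l.dropWhile p = l.filter (fun a => !p a) := by
  induction l with
  | nil => rfl
  | cons a l ih =>
    rcases List.pairwise_cons.mp h with ⟨ha, hl⟩
    by_cases hp : p a = true
    · simp [List.dropWhile_cons, List.filter_cons, hp, ih hl]
    · have hpa : p a = false := by simpa using hp
      have : l.filter (fun a => !p a) = l := List.filter_eq_self.mpr (fun b hb => by
        have : p b = false := by
          cases hpb : p b
          · rfl
          · exact absurd (ha b hb hpb) hp
        simp [this])
      simp [List.dropWhile_cons, List.filter_cons, hpa, this]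

lemma pv_popBack_eq_filter (q : List (Int × Int)) (val : Int)
    (h : q.Pairwise (fun a b => a.1 ≤ b.1)) :
    pvPopBack q val = q.filter (fun e => decide (e.1 ≤ val)) := by
  unfold pvPopBack
  rw [pv_dropWhile_eq_filter_not (fun e => decide (val < e.1)) q.reverse ?hp]
  · rw [← List.filter_reverse, List.reverse_reverse]
    apply List.filter_congr
    intro e _
    by_cases he : val < e.1 <;> simp [he] <;> omega
  · rw [List.pairwise_reverse]
    exact h.imp (by intro a b hab; simp; omega)

lemma pv_getF_setF_pred (jumps : Int) (hj : 1 ≤ jumps) (f : List (List Int)) (a b x : Int) :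
    pvGetF (pvSetF f a jumps x) b (jumps - 1) = pvGetF f b (jumps - 1) := by
  unfold pvGetF pvSetF
  have hcol : jumps.toNat ≠ (jumps - 1).toNat := by omega
  by_cases hab : a.toNat = b.toNat
  · rw [← hab]
    simp only [List.getD_eq_getElem?_getD]
    by_cases hlt : a.toNat < f.length
    · rw [List.getElem?_set_self hlt]
      simp only [Option.getD_some]
      rw [List.getElem?_set_ne hcol]
    · rw [List.set_eq_of_length_le (by omega)]
  · simp only [List.getD_eq_getElem?_getD]
    rw [List.getElem?_set_ne hab]

lemma pv_stab (k jumps : Int) (c : List Int) (hj : 1 ≤ jumps) :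
    ∀ (is : List Int) (F : List (List Int)) (b : Int),
      pvGetF (is.foldl (pvStepB k jumps c) F) b (jumps - 1) = pvGetF F b (jumps - 1) := by
  intro is
  induction is with
  | nil => intro F b; rfl
  | cons i l ih =>
    intro F b
    simp only [List.foldl_cons]
    rw [ih]
    exact pv_getF_setF_pred jumps hj F i b _

lemma pv_canon_pairwise_idx (k : Int) (c : List Int) (jumps : Int) (F : List (List Int)) (t : Int) :
    (pvCanon k c jumps F t).Pairwise (fun a b => a.2 < b.2) := by
  unfold pvCanon
  rw [List.pairwise_filterMap]
  refine (PySem.List.pairwise_lt_pyRange_one 0 t).imp ?_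
  intro a b hab x hx y hy
  by_cases ha : pvCond k c jumps F t a = true
  · by_cases hb : pvCond k c jumps F t b = true
    · simp only [ha, if_true] at hx
      simp only [hb, if_true] at hy
      cases hx; cases hy; simpa using hab
    · simp [hb] at hy
  · simp [ha] at hx

lemma pv_q1_pairwise_val (L : Int) (c : List Int) (jumps : Int) (F : List (List Int)) (t : Int) :
    (pvQ1 L c jumps F t).Pairwise (fun a b => a.1 ≤ b.1) := by
  unfold pvQ1
  rw [List.pairwise_filterMap]
  have hpw : (PySem.List.pyRange 0 t).Pairwise (fun a b => a < b ∧ b < t) := by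
    rw [List.pairwise_iff_forall_sublist]
    intro a b hsub
    have hmem : b ∈ PySem.List.pyRange 0 t := hsub.subset (by simp)
    have hlt : a < b :=
      List.pairwise_iff_forall_sublist.mp (PySem.List.pairwise_lt_pyRange_one 0 t) hsub
    exact ⟨hlt, (PySem.List.mem_pyRange_one.mp hmem).2⟩
  refine hpw.imp ?_
  intro a b hab x hx y hy
  by_cases ha : pvCondA L c jumps F t a = true
  · by_cases hb : pvCondA L c jumps F t b = true
    · simp only [ha, if_true] at hx
      simp only [hb, if_true] at hy
      cases hx; cases hy
      simp only
      have hall : pvAllLe c jumps F (a + 1) t a = true := by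
        unfold pvCondA at ha
        simp only [Bool.and_eq_true] at ha
        exact ha.2
      unfold pvAllLe at hall
      rw [List.all_eq_true] at hall
      have := hall b (PySem.List.mem_pyRange_one.mpr ⟨by omega, hab.2⟩)
      simp only [decide_eq_true_eq] at this
      simp only [pvV] at *
      omega
    · simp [hb] at hy
  · simp [ha] at hx

lemma pv_q1_eq (n k jumps t : Int) (c : List Int) (F : List (List Int)) :
    (pvCanon k c jumps F t).dropWhile (fun e => decide (e.2 < max 0 (t - k)))
      = pvQ1 (max 0 (t - k)) c jumps F t := by
  rw [pv_dropWhile_eq_filter_not _ _ ((pv_canon_pairwise_idx k c jumps F t).imp (by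
    intro a b hab
    simp only [decide_eq_true_eq]
    omega))]
  unfold pvCanon pvQ1
  rw [List.filter_filterMap]
  apply List.filterMap_congr
  intro j hjmem
  obtain ⟨hj0, hjt⟩ := PySem.List.mem_pyRange_one.mp hjmem
  by_cases hL : max 0 (t - k) ≤ j
  · have h1 : (decide (t ≤ j + 1) || decide (max 0 (t - 1 - k) ≤ j)) = true := by
      simp only [Bool.or_eq_true, decide_eq_true_eq]
      omega
    have h2 : (decide (j < max 0 (t - k))) = false := by simp; omega
    by_cases hA : pvAllLe c jumps F (j + 1) t j = true
    · simp [pvCond, pvCondA, hA, Option.filter]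
      rw [if_pos (show t ≤ j + 1 ∨ 0 ≤ j ∧ t ≤ j + k + 1 by omega)]
    · simp [pvCond, pvCondA, hA]
  · have h2 : (decide ((j : Int) < max 0 (t - k))) = true := by simp; omega
    by_cases hc : pvCond k c jumps F t j = true
    · simp [pvCondA, hc, Option.filter, hL]
      omega
    · simp [pvCondA, hc, hL]

-- fold-min toolbox
lemma pv_foldl_min_le (xs : List Int) (init : Int) :
    xs.foldl min init ≤ init ∧ ∀ x ∈ xs, xs.foldl min init ≤ x := by
  induction xs generalizing init with
  | nil => simp
  | cons a l ih =>
    obtain ⟨h1, h2⟩ := ih (min init a)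
    refine ⟨le_trans h1 (by omega), ?_⟩
    intro x hx
    rcases List.mem_cons.mp hx with rfl | hx
    · exact le_trans h1 (by omega)
    · exact h2 x hx

lemma pv_foldl_min_cases (xs : List Int) (init : Int) :
    xs.foldl min init = init ∨ xs.foldl min init ∈ xs := by
  induction xs generalizing init with
  | nil => simp
  | cons a l ih =>
    rcases ih (min init a) with h | h
    · by_cases hle : init ≤ a
      · left; simp only [List.foldl_cons]; omega
      · right; simp only [List.foldl_cons]; rw [h]
        have hmin : min init a = a := by omega
        rw [hmin]; exact List.mem_cons_self
    · right; exact List.mem_cons_of_mem _ h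

lemma pv_foldl_min_eq_init (xs : List Int) (init : Int) (h : ∀ x ∈ xs, init ≤ x) :
    xs.foldl min init = init := by
  induction xs with
  | nil => rfl
  | cons a l ih =>
    have : min init a = init := by have := h a (by simp); omega
    simp only [List.foldl_cons, this]
    exact ih (fun x hx => h x (List.mem_cons_of_mem _ hx))

lemma pv_foldl_min_eq_of_dom (xs ys : List Int) (init : Int)
    (h1 : ∀ x ∈ xs, ∃ y ∈ ys, y ≤ x) (h2 : ∀ y ∈ ys, ∃ x ∈ xs, x ≤ y) :
    xs.foldl min init = ys.foldl min init := by
  apply le_antisymm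
  · rcases pv_foldl_min_cases ys init with h | h
    · rw [h]; exact (pv_foldl_min_le xs init).1
    · obtain ⟨x, hx, hxy⟩ := h2 _ h
      exact le_trans ((pv_foldl_min_le xs init).2 x hx) hxy
  · rcases pv_foldl_min_cases xs init with h | h
    · rw [h]; exact (pv_foldl_min_le ys init).1
    · obtain ⟨y, hy, hyx⟩ := h1 _ h
      exact le_trans ((pv_foldl_min_le ys init).2 y hy) hyx

lemma pv_dom2 (c : List Int) (jumps : Int) (F : List (List Int)) (L t : Int) (h0 : 0 ≤ L) :
    ∀ (d : Nat) (j : Int), L ≤ j → j < t → (t - j).toNat ≤ d →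
      ∃ e ∈ pvQ1 L c jumps F t, e.1 ≤ pvV c jumps F j := by
  intro d
  induction d with
  | zero => intro j h1 h2 h3; omega
  | succ d ih =>
    intro j h1 h2 h3
    by_cases hc : pvAllLe c jumps F (j + 1) t j = true
    · refine ⟨(pvV c jumps F j, j), ?_, le_refl _⟩
      unfold pvQ1
      rw [List.mem_filterMap]
      refine ⟨j, PySem.List.mem_pyRange_one.mpr ⟨by omega, h2⟩, ?_⟩
      have : pvCondA L c jumps F t j = true := by
        unfold pvCondA
        simp [hc]
        omega
      simp [this]
    · obtain ⟨j', hj'mem, hj'⟩ : ∃ j' ∈ PySem.List.pyRange (j + 1) t,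
          ¬(pvV c jumps F j ≤ pvU c jumps F j') := by
        unfold pvAllLe at hc
        rw [List.all_eq_true] at hc
        push_neg at hc
        obtain ⟨j', hm, hd⟩ := hc
        exact ⟨j', hm, by simpa using hd⟩
      obtain ⟨hj'1, hj'2⟩ := PySem.List.mem_pyRange_one.mp hj'mem
      have hvv : pvV c jumps F j' < pvV c jumps F j := by
        simp only [pvV] at *
        omega
      obtain ⟨e, he, hle⟩ := ih j' (by omega) (by omega) (by omega)
      exact ⟨e, he, by omega⟩

-- head of the pruned deque = window minimum
lemma pv_head_eq_min (c : List Int) (jumps : Int) (F : List (List Int)) (L t : Int) (h0 : 0 ≤ L) :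
    (match pvQ1 L c jumps F t with | [] => pvINF | e :: _ => e.1)
      = (PySem.List.pyRange L t).foldl (fun b j => min b (pvV c jumps F j)) pvINF := by
  have hchar : ∀ e' ∈ pvQ1 L c jumps F t,
      e' = (pvV c jumps F e'.2, e'.2) ∧ L ≤ e'.2 ∧ 0 ≤ e'.2 ∧ e'.2 < t := by
    intro e' he'
    unfold pvQ1 at he'
    rw [List.mem_filterMap] at he'
    obtain ⟨j, hjmem, hj⟩ := he'
    obtain ⟨hj0, hjt⟩ := PySem.List.mem_pyRange_one.mp hjmem
    by_cases hcA : pvCondA L c jumps F t j = true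
    · simp only [hcA, if_true] at hj
      cases hj
      have : L ≤ j := by
        unfold pvCondA at hcA
        simp only [Bool.and_eq_true, decide_eq_true_eq] at hcA
        exact hcA.1
      exact ⟨rfl, this, hj0, hjt⟩
    · simp [hcA] at hj
  have hfold : (PySem.List.pyRange L t).foldl (fun b j => min b (pvV c jumps F j)) pvINF
      = ((PySem.List.pyRange L t).map (pvV c jumps F)).foldl min pvINF := by
    rw [List.foldl_map]
  cases hQ : pvQ1 L c jumps F t with
  | nil =>
    by_cases hr : L < t
    · obtain ⟨e, he, -⟩ := pv_dom2 c jumps F L t h0 (t - L).toNat (t - 1)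
        (by omega) (by omega) (by omega)
      rw [hQ] at he
      simp at he
    · rw [PySem.List.pyRange_one_eq_nil (by omega)]
      rfl
  | cons e rest =>
    rw [hfold]
    have hys : ((e :: rest).map (fun e => e.1)).foldl min pvINF = e.1 := by
      have hpw := pv_q1_pairwise_val L c jumps F t
      rw [hQ, List.pairwise_cons] at hpw
      have he1 : e.1 ≤ pvINF := by
        have := (hchar e (by rw [hQ]; simp)).1
        have : e.1 = pvV c jumps F e.2 := by rw [this]
        simp only [pvV] at this
        omega
      simp only [List.map_cons, List.foldl_cons]
      rw [show min pvINF e.1 = e.1 by omega]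
      apply pv_foldl_min_eq_init
      intro x hx
      rw [List.mem_map] at hx
      obtain ⟨e', he', rfl⟩ := hx
      exact hpw.1 e' he'
    show e.1 = _
    rw [← hys]
    apply pv_foldl_min_eq_of_dom
    · intro y hy
      rw [List.mem_map] at hy
      obtain ⟨e', he', rfl⟩ := hy
      rw [← hQ] at he'
      obtain ⟨heq, hL', h0', ht'⟩ := hchar e' he'
      refine ⟨pvV c jumps F e'.2, ?_, by rw [heq]⟩
      exact List.mem_map_of_mem (PySem.List.mem_pyRange_one.mpr ⟨hL', ht'⟩)
    · intro x hx
      rw [List.mem_map] at hx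
      obtain ⟨j, hjmem, rfl⟩ := hx
      obtain ⟨hjL, hjt⟩ := PySem.List.mem_pyRange_one.mp hjmem
      obtain ⟨e', he', hle⟩ := pv_dom2 c jumps F L t h0 (t - j).toNat j hjL hjt (le_refl _)
      rw [hQ] at he'
      exact ⟨e'.1, List.mem_map_of_mem he', hle⟩

lemma pv_best_eq (k jumps t : Int) (c : List Int) (F fB : List (List Int))
    (hstab : ∀ b, pvGetF fB b (jumps - 1) = pvGetF F b (jumps - 1)) :
    pvBest k jumps c fB t
      = (PySem.List.pyRange (max 0 (t - k)) t).foldl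
          (fun b j => min b (pvV c jumps F j)) pvINF := by
  unfold pvBest
  apply PySem.List.foldl_congr_mem
  intro b j hjmem
  rw [hstab j]
  show (if min (pvU c jumps F j) pvINF < b then min (pvU c jumps F j) pvINF else b)
      = min b (pvV c jumps F j)
  simp only [pvV]
  split
  · omega
  · omega

lemma pv_push_eq (k jumps t : Int) (c : List Int) (F : List (List Int)) (h0 : 0 ≤ t) :
    (pvQ1 (max 0 (t - k)) c jumps F t).filter (fun e => decide (e.1 ≤ pvU c jumps F t))
        ++ [(pvV c jumps F t, t)]
      = pvCanon k c jumps F (t + 1) := by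
  unfold pvCanon
  rw [PySem.List.pyRange_one_succ_right h0, List.filterMap_append]
  congr 1
  · unfold pvQ1
    rw [List.filter_filterMap]
    apply List.filterMap_congr
    intro j hjmem
    obtain ⟨hj0, hjt⟩ := PySem.List.mem_pyRange_one.mp hjmem
    have hsplit : pvAllLe c jumps F (j + 1) (t + 1) j
        = (pvAllLe c jumps F (j + 1) t j && decide (pvV c jumps F j ≤ pvU c jumps F t)) := by
      unfold pvAllLe
      rw [PySem.List.pyRange_one_succ_right (by omega : j + 1 ≤ t), List.all_append]
      simp
    have hfirst : (decide (t + 1 ≤ j + 1) || decide (max 0 (t + 1 - 1 - k) ≤ j))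
        = decide (max 0 (t - k) ≤ j) := by
      have h1 : decide (t + 1 ≤ j + 1) = false := by simp; omega
      have h2 : max 0 (t + 1 - 1 - k) = max 0 (t - k) := by omega
      rw [h1, h2, Bool.false_or]
    unfold pvCond pvCondA
    rw [hsplit, hfirst]
    by_cases hL : max 0 (t - k) ≤ j
    · by_cases hA : pvAllLe c jumps F (j + 1) t j = true
      · by_cases hv : pvV c jumps F j ≤ pvU c jumps F t
        · simp [hL, hA, hv, Option.filter, pvV]
        · simp [hL, hA, hv, Option.filter]
      · simp [hA]
    · simp [hL]
  · have hcond : pvCond k c jumps F (t + 1) t = true := by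
      unfold pvCond pvAllLe
      rw [PySem.List.pyRange_one_eq_nil (by omega : t + 1 ≤ t + 1)]
      simp
    simp [hcond]

lemma pv_stepA_eq (n k jumps t : Int) (c : List Int) (F fB : List (List Int))
    (hj : 1 ≤ jumps) (h0 : 0 ≤ t)
    (hstab : ∀ b, pvGetF fB b (jumps - 1) = pvGetF F b (jumps - 1)) :
    pvStepA n k jumps c (fB, pvCanon k c jumps F t) t
      = (pvStepB k jumps c fB t,
         if t < n then pvCanon k c jumps F (t + 1) else pvQ1 (max 0 (t - k)) c jumps F t) := by
  have h0L : (0 : Int) ≤ max 0 (t - k) := le_max_left _ _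
  have hfv : (match pvQ1 (max 0 (t - k)) c jumps F t with | [] => pvINF | e :: _ => e.1)
      = pvBest k jumps c fB t := by
    rw [pv_best_eq k jumps t c F fB hstab, pv_head_eq_min c jumps F _ t h0L]
  have hval : pvGetF (pvSetF fB t jumps (pvBest k jumps c fB t)) t (jumps - 1)
        + c.getD t.toNat 0 = pvU c jumps F t := by
    rw [pv_getF_setF_pred jumps hj, hstab]
    rfl
  unfold pvStepA pvStepB
  simp only [pv_q1_eq n k jumps t c F, hfv, hval]
  split
  · rw [pv_popBack_eq_filter _ _ (pv_q1_pairwise_val _ c jumps F t),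
      show min (pvU c jumps F t) pvINF = pvV c jumps F t from rfl,
      pv_push_eq k jumps t c F h0]
  · rfl

lemma pv_pass_main (n k jumps : Int) (c : List Int) (F : List (List Int)) (hj : 1 ≤ jumps) :
    ∀ (T : Nat), (T : Int) ≤ n + 1 →
      (((PySem.List.pyRange 0 (T : Int)).foldl (pvStepA n k jumps c) (F, [])).1
          = (PySem.List.pyRange 0 (T : Int)).foldl (pvStepB k jumps c) F)
      ∧ ((T : Int) ≤ n →
          ((PySem.List.pyRange 0 (T : Int)).foldl (pvStepA n k jumps c) (F, [])).2
            = pvCanon k c jumps F (T : Int)) := by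
  intro T
  induction T with
  | zero =>
    intro _
    rw [show ((0 : Nat) : Int) = 0 by rfl, PySem.List.pyRange_one_eq_nil (le_refl 0)]
    constructor
    · rfl
    · intro _
      unfold pvCanon
      rw [PySem.List.pyRange_one_eq_nil (le_refl 0)]
      rfl
  | succ T ih =>
    intro hT1
    have hT1' : (T : Int) ≤ n := by push_cast at hT1 ⊢; omega
    obtain ⟨ihf, ihq⟩ := ih (by omega)
    have hstate : (PySem.List.pyRange 0 (T : Int)).foldl (pvStepA n k jumps c) (F, [])
        = ((PySem.List.pyRange 0 (T : Int)).foldl (pvStepB k jumps c) F,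
           pvCanon k c jumps F (T : Int)) := by
      refine Prod.ext ?_ ?_
      · exact ihf
      · exact ihq hT1'
    have hstabT : ∀ b, pvGetF ((PySem.List.pyRange 0 (T : Int)).foldl (pvStepB k jumps c) F)
        b (jumps - 1) = pvGetF F b (jumps - 1) :=
      fun b => pv_stab k jumps c hj _ F b
    have hr : PySem.List.pyRange 0 ((T + 1 : Nat) : Int)
        = PySem.List.pyRange 0 (T : Int) ++ [(T : Int)] := by
      push_cast
      exact PySem.List.pyRange_one_succ_right (by positivity)
    rw [hr, List.foldl_append, List.foldl_append, hstate]
    simp only [List.foldl_cons, List.foldl_nil]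
    rw [pv_stepA_eq n k jumps (T : Int) c F _ hj (by positivity) hstabT]
    constructor
    · rfl
    · intro hn
      have hTn : (T : Int) < n := by push_cast at hn; omega
      rw [if_pos hTn]
      simp only
      push_cast
      rfl

lemma pv_pass_eq (n k jumps : Int) (c : List Int) (F : List (List Int)) (hj : 1 ≤ jumps) :
    pvPassA n k c F jumps = pvPassB n k c F jumps := by
  unfold pvPassA pvPassB
  by_cases hn : 0 ≤ n
  · have hcast : (((n + 1).toNat : Nat) : Int) = n + 1 := by omega
    have h := (pv_pass_main n k jumps c F hj (n + 1).toNat (by omega)).1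
    rw [hcast] at h
    exact h
  · rw [PySem.List.pyRange_one_eq_nil (by omega : n + 1 ≤ 0)]
    rfl

-- ===== VERDICT (by name: the statement is the Claim_ definition above) =====
theorem dp_spec : Claim_equal_dp := by
  intro n k m c f _ _
  unfold Spec_dp dp dp_alt
  rw [PySem.List.foldl_congr_mem _ (pvPassA n k c) (pvPassB n k c) _ ?_]
  intro acc jumps hmem
  exact pv_pass_eq n k jumps c acc (PySem.List.mem_pyRange_one.mp hmem).1
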